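-- pv_equiv track=rewrite | github.com/wiwiluo/BunkrDownloader | helpers/download_utils.py | get_chunk_size
-- ===== SOURCE A (Python) =====
-- KB = 1024
--
-- MB = 1024 * KB
--
-- def get_chunk_size(file_size):
--     """
--     Determines the optimal chunk size based on the file size.
--
--     Args:
--         file_size (int): The size of the file in bytes.
--
--     Returns:
--         int: The optimal chunk size in bytes.
--     """
-- #    thresholds = [
-- #        (1 * MB, 16 * KB),     # Less than 1 MB
-- #        (10 * MB, 64 * KB),    # 1 MB to 10 MB
-- #        (100 * MB, 256 * KB),  # 10 MB to 100 MB
-- #        (250 * MB, 512 * KB)   # 100 MB to 250 MB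
-- #    ]
--     thresholds = [
--         (1 * MB, 64 * KB),    # Less than 1 MB
--         (10 * MB, 512 * KB),  # 1 MB to 10 MB
--         (50 * MB, 2 * MB),    # 10 MB to 50 MB
--         (100 * MB, 5 * MB),   # 50 MB to 100 MB
--         (250 * MB, 10 * MB),  # 100 MB to 250 MB
--         (500 * MB, 20 * MB)   # 250 MB to 500 MB
--     ]
--
--     for threshold, chunk_size in thresholds:
--         if file_size < threshold:
--             return chunk_size
--
--     return 25 * MB
-- ===== SOURCE B (Python) =====
-- import bisect
--
-- KB = 1024
-- MB = 1024 * KB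
--
-- _BOUNDARIES = [1 * MB, 10 * MB, 50 * MB, 100 * MB, 250 * MB, 500 * MB]
-- _CHUNKS = [64 * KB, 512 * KB, 2 * MB, 5 * MB, 10 * MB, 20 * MB, 25 * MB]
--
-- def get_chunk_size(file_size):
--     return _CHUNKS[bisect.bisect_right(_BOUNDARIES, file_size)]
-- ===== Notes on version B (the rewrite author's own statement) =====
-- stated objective: idiomatic
-- what changed: Replaced the linear scan over (threshold, chunk) pairs with a binary-search bucket lookup: bisect_right over a sorted boundary list indexes into a parallel chunk-size list.
import Mathlib
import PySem

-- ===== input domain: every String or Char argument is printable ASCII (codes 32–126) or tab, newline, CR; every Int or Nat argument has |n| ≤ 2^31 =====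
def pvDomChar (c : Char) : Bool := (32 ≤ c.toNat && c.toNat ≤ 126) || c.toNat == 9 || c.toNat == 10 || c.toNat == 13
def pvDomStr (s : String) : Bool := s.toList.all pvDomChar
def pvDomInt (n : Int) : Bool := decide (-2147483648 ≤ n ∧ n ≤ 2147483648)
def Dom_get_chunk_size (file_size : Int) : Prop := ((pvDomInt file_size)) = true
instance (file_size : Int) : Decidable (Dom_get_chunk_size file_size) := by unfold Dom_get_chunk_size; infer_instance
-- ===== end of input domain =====

-- B replaces A's linear scan over (threshold, chunk) pairs with a bisect_right
-- binary search over a sorted boundary list indexing a parallel chunk list (idiomatic).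

def pyKB : Int := 1024
def pyMB : Int := 1024 * pyKB

-- ===== PORT A =====
-- A's for-loop with early return over the thresholds list
def chunkScan (file_size : Int) : List (Int × Int) → Int
  | [] => 25 * pyMB
  | (threshold, chunk_size) :: rest =>
      if file_size < threshold then chunk_size else chunkScan file_size rest

def get_chunk_size (file_size : Int) : Int :=
  chunkScan file_size
    [(1 * pyMB, 64 * pyKB), (10 * pyMB, 512 * pyKB), (50 * pyMB, 2 * pyMB),
     (100 * pyMB, 5 * pyMB), (250 * pyMB, 10 * pyMB), (500 * pyMB, 20 * pyMB)]

-- ===== PORT B =====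
def pyBoundaries : List Int :=
  [1 * pyMB, 10 * pyMB, 50 * pyMB, 100 * pyMB, 250 * pyMB, 500 * pyMB]
def pyChunks : List Int :=
  [64 * pyKB, 512 * pyKB, 2 * pyMB, 5 * pyMB, 10 * pyMB, 20 * pyMB, 25 * pyMB]

-- bisect.bisect_right as CPython implements it: binary search on the half-open range [lo, hi)
def bisectRight (xs : List Int) (x : Int) (lo hi : Nat) : Nat :=
  if lo < hi then
    let mid := (lo + hi) / 2
    if x < xs.getD mid 0 then bisectRight xs x lo mid
    else bisectRight xs x (mid + 1) hi
  else lo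
termination_by hi - lo
decreasing_by all_goals omega

def get_chunk_size_alt (file_size : Int) : Int :=
  pyChunks.getD (bisectRight pyBoundaries file_size 0 pyBoundaries.length) 0

-- ===== PRECONDITION & SPEC =====
def Spec_get_chunk_size (file_size : Int) (out : Int) : Prop := out = get_chunk_size_alt file_size
instance (file_size : Int) (out : Int) : Decidable (Spec_get_chunk_size file_size out) := by unfold Spec_get_chunk_size; infer_instance

-- ===== CLAIM (what is proved, stated in full; the proofs are below) =====
def Claim_equal_get_chunk_size : Prop := ∀ (file_size : Int), Dom_get_chunk_size file_size → Spec_get_chunk_size file_size (get_chunk_size file_size)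

-- ===== LEMMAS AND PROOFS =====

theorem bisectRight_step (xs : List Int) (x : Int) (lo hi : Nat) (h : lo < hi) :
    bisectRight xs x lo hi =
      if x < xs.getD ((lo + hi) / 2) 0 then bisectRight xs x lo ((lo + hi) / 2)
      else bisectRight xs x ((lo + hi) / 2 + 1) hi := by
  rw [bisectRight]; simp [h]

theorem bisectRight_stop (xs : List Int) (x : Int) (lo : Nat) : bisectRight xs x lo lo = lo := by
  rw [bisectRight]; simp

-- the binary search on the concrete 6-element boundary list, as a cascade of comparisons
theorem bisect_eval (fs : Int) :
    bisectRight pyBoundaries fs 0 6 =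
      if fs < 1048576 then 0 else if fs < 10485760 then 1 else if fs < 52428800 then 2
      else if fs < 104857600 then 3 else if fs < 262144000 then 4
      else if fs < 524288000 then 5 else 6 := by
  rw [bisectRight_step _ _ _ _ (by norm_num)]
  norm_num [pyBoundaries, pyMB, pyKB]
  by_cases h3 : fs < 104857600 <;> simp only [h3, if_true, if_false]
  · rw [bisectRight_step _ _ _ _ (by norm_num)]
    norm_num [pyBoundaries, pyMB, pyKB]
    by_cases h1 : fs < 10485760 <;> simp only [h1, if_true, if_false]
    · rw [bisectRight_step _ _ _ _ (by norm_num)]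
      norm_num [pyBoundaries, pyMB, pyKB]
      by_cases h0 : fs < 1048576 <;> simp only [h0, if_true, if_false]
      all_goals rw [bisectRight_stop]
    · rw [bisectRight_step _ _ _ _ (by norm_num)]
      norm_num [pyBoundaries, pyMB, pyKB]
      by_cases h2 : fs < 52428800 <;> simp only [h2, if_true, if_false] <;>
        rw [bisectRight_stop] <;> split_ifs <;> omega
  · rw [bisectRight_step _ _ _ _ (by norm_num)]
    norm_num [pyBoundaries, pyMB, pyKB]
    by_cases h5 : fs < 524288000 <;> simp only [h5, if_true, if_false]
    · rw [bisectRight_step _ _ _ _ (by norm_num)]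
      norm_num [pyBoundaries, pyMB, pyKB]
      by_cases h4 : fs < 262144000 <;> simp only [h4, if_true, if_false] <;>
        rw [bisectRight_stop] <;> split_ifs <;> omega
    · rw [bisectRight_stop]; split_ifs <;> omega

theorem alt_eval (fs : Int) :
    get_chunk_size_alt fs =
      if fs < 1048576 then 65536 else if fs < 10485760 then 524288
      else if fs < 52428800 then 2097152 else if fs < 104857600 then 5242880
      else if fs < 262144000 then 10485760 else if fs < 524288000 then 20971520
      else 26214400 := by
  show pyChunks.getD (bisectRight pyBoundaries fs 0 pyBoundaries.length) 0 = _
  have : pyBoundaries.length = 6 := by rfl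
  rw [this, bisect_eval]
  split_ifs <;> norm_num [pyChunks, pyMB, pyKB]

-- ===== VERDICT (by name: the statement is the Claim_ definition above) =====
theorem get_chunk_size_spec : Claim_equal_get_chunk_size := by
  intro fs _
  unfold Spec_get_chunk_size get_chunk_size
  rw [alt_eval]
  simp only [chunkScan, pyMB, pyKB]
  norm_num
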